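-- pv_equiv track=rewrite | github.com/jinzer0/KUWorkspace | src/storage/jsonl_handler.py | decode_record
-- ===== SOURCE A (Python) =====
-- from typing import List, Optional
--
-- def _unescape_field(value: str) -> str:
--     result = []
--     escaped = False
--     for ch in value:
--         if escaped:
--             result.append(ch)
--             escaped = False
--             continue
--         if ch == "\\":
--             escaped = True
--             continue
--         result.append(ch)
--     if escaped:
--         result.append("\\")
--     return "".join(result)
--
-- def _split_escaped(line: str) -> list[str]:
--     parts = []
--     buf = []
--     escaped = False
--     for ch in line:
--         if escaped:
--             buf.append("\\")
--             buf.append(ch)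
--             escaped = False
--             continue
--         if ch == "\\":
--             escaped = True
--             continue
--         if ch == "|":
--             parts.append("".join(buf))
--             buf = []
--             continue
--         buf.append(ch)
--     if escaped:
--         raise ValueError("잘못된 이스케이프 시퀀스입니다.")
--     parts.append("".join(buf))
--     return parts
--
-- def decode_record(line: str) -> List[Optional[str]]:
--     values = _split_escaped(line)
--     decoded: List[Optional[str]] = []
--     for value in values:
--         if value == "\\-":
--             decoded.append(None)
--         else:
--             decoded.append(_unescape_field(value))
--     return decoded
-- ===== SOURCE B (Python) =====
-- from typing import List, Optional
--
-- def decode_record(line: str) -> List[Optional[str]]: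
--     # single fused pass: unescaped buffer + escape flag + raw-field marker
--     decoded: List[Optional[str]] = []
--     buf = []
--     escaped = False
--     st = 0  # 0: raw field empty so far, 1: raw field exactly '\-', 2: anything else
--     for ch in line:
--         if escaped:
--             buf.append(ch)
--             st = 1 if (st == 0 and ch == "-") else 2
--             escaped = False
--         elif ch == "\\":
--             escaped = True
--         elif ch == "|":
--             decoded.append(None if st == 1 else "".join(buf))
--             buf = []
--             st = 0
--         else:
--             buf.append(ch)
--             st = 2
--     if escaped:
--         raise ValueError("잘못된 이스케이프 시퀀스입니다.")
--     decoded.append(None if st == 1 else "".join(buf))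
--     return decoded
-- ===== Notes on version B (the rewrite author's own statement) =====
-- stated objective: alternative
-- what changed: The split-then-unescape two-stage pipeline (build raw escaped fields, then re-scan each to unescape) is fused into a single state-machine pass that keeps the already-unescaped buffer plus a 3-valued marker distinguishing an empty raw field, a raw field that is exactly one escaped dash (the None sentinel), and anything else.
import Mathlib
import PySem

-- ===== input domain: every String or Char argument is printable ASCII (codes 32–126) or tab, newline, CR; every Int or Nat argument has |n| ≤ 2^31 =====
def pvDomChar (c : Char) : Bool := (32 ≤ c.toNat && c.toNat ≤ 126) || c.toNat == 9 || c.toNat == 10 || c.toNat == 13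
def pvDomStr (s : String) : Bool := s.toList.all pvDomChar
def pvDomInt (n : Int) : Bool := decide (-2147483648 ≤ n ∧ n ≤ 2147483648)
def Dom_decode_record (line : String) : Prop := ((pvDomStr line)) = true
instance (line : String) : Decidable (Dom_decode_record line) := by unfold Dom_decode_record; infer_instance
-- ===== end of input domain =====

-- B fuses A's split-then-unescape two-stage pipeline into one state-machine pass over the line (objective: alternative decomposition; same O(n)).

-- ===== PORT A =====
-- loop of _unescape_field: (chars, escaped, result) → (result, escaped at end)
def uGo : List Char → Bool → List Char → List Char × Bool
  | [], esc, res => (res, esc)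
  | c :: cs, esc, res =>
    if esc then uGo cs false (res ++ [c])
    else if c = '\\' then uGo cs true res
    else uGo cs false (res ++ [c])

def _unescape_field (value : String) : String :=
  match uGo value.toList false [] with
  | (res, esc) => String.ofList (if esc then res ++ ['\\'] else res)

-- loop of _split_escaped; none = the ValueError on a dangling escape
def splitGo : List Char → Bool → List Char → List String → Option (List String)
  | [], esc, buf, parts => if esc then none else some (parts ++ [String.ofList buf])
  | c :: cs, esc, buf, parts =>
    if esc then splitGo cs false (buf ++ ['\\', c]) parts
    else if c = '\\' then splitGo cs true buf parts
    else if c = '|' then splitGo cs false [] (parts ++ [String.ofList buf])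
    else splitGo cs false (buf ++ [c]) parts

def decode_record (line : String) : List (Option String) :=
  match splitGo line.toList false [] [] with
  | none => []   -- unreachable under Pre_decode_record (Python raises ValueError)
  | some values =>
    values.map (fun value => if value = "\\-" then none else some (_unescape_field value))

-- ===== PORT B =====
-- one fused pass: (chars, escaped, unescaped buffer, raw marker st, output); none = ValueError
-- st: 0 = raw field empty so far, 1 = raw field exactly "\-", 2 = anything else
def altGo : List Char → Bool → List Char → Nat → List (Option String) → Option (List (Option String))
  | [], esc, buf, st, out =>
    if esc then none else some (out ++ [if st = 1 then none else some (String.ofList buf)])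
  | c :: cs, esc, buf, st, out =>
    if esc then altGo cs false (buf ++ [c]) (if st = 0 ∧ c = '-' then 1 else 2) out
    else if c = '\\' then altGo cs true buf st out
    else if c = '|' then altGo cs false [] 0 (out ++ [if st = 1 then none else some (String.ofList buf)])
    else altGo cs false (buf ++ [c]) 2 out

def decode_record_alt (line : String) : List (Option String) :=
  match altGo line.toList false [] 0 [] with
  | none => []   -- unreachable under Pre_decode_record (Python raises ValueError)
  | some decoded => decoded

-- ===== PRECONDITION & SPEC =====
-- Pre_ excludes exactly the lines ending in an odd run of backslashes (a dangling escape), on which Python A raises ValueError.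
def Pre_decode_record (line : String) : Prop :=
  (line.toList.reverse.takeWhile (· = '\\')).length % 2 = 0
instance (line : String) : Decidable (Pre_decode_record line) := by
  unfold Pre_decode_record; infer_instance

def pvWitness_decode_record : String := "a|\\-|b\\|c|\\\\"

def Spec_decode_record (line : String) (out : List (Option String)) : Prop := out = decode_record_alt line
instance (line : String) (out : List (Option String)) : Decidable (Spec_decode_record line out) := by unfold Spec_decode_record; infer_instance

-- ===== CLAIM (what is proved, stated in full; the proofs are below) =====
def Claim_equal_decode_record : Prop := ∀ (line : String), Dom_decode_record line → Pre_decode_record line → Spec_decode_record line (decode_record line)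

-- ===== LEMMAS AND PROOFS =====

-- the per-field decoding A applies to each raw part
def fld (v : String) : Option String :=
  if v = "\\-" then none else some (_unescape_field v)

-- B's raw-field marker, as a function of A's raw buffer
def stOf (buf : List Char) : Nat :=
  if buf = [] then 0 else if buf = ['\\', '-'] then 1 else 2

lemma uGo_append (xs ys : List Char) (esc : Bool) (res : List Char) :
    uGo (xs ++ ys) esc res = uGo ys (uGo xs esc res).2 (uGo xs esc res).1 := by
  induction xs generalizing esc res with
  | nil => simp [uGo]
  | cons c cs ih =>
    by_cases h : esc = true <;> by_cases h2 : c = '\\' <;>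
      simp_all [uGo]

lemma fld_mk (buf : List Char) (h : (uGo buf false []).2 = false) :
    fld (String.ofList buf) =
      if stOf buf = 1 then none else some (String.ofList (uGo buf false []).1) := by
  unfold fld stOf _unescape_field
  by_cases hb : buf = ['\\', '-']
  · subst hb
    have he : String.ofList ['\\', '-'] = "\\-" := by decide
    simp [he]
  · have hne : String.ofList buf ≠ "\\-" := by
      intro hcontra
      apply hb
      have := congrArg String.toList hcontra
      simpa using this
    by_cases hnil : buf = []
    · subst hnil; simp [hne, uGo]
    · simp [hne, hb, hnil, h]

-- main invariant: the fused pass agrees with split-then-map from any aligned state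
lemma main_inv : ∀ (cs : List Char) (esc : Bool) (buf : List Char) (parts : List String),
    (uGo buf false []).2 = false →
    Option.map (List.map fld) (splitGo cs esc buf parts) =
      altGo cs esc (uGo buf false []).1 (stOf buf) (List.map fld parts) := by
  intro cs
  induction cs with
  | nil =>
    intro esc buf parts h
    cases esc with
    | false =>
      simp [splitGo, altGo, fld_mk buf h]
    | true => simp [splitGo, altGo]
  | cons c cs ih =>
    intro esc buf parts h
    cases esc with
    | true =>
      have hcomp := uGo_append buf ['\\', c] false []
      have h1 : (uGo (buf ++ ['\\', c]) false []).1 = (uGo buf false []).1 ++ [c] := by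
        rw [hcomp, h]; simp [uGo]
      have h2 : (uGo (buf ++ ['\\', c]) false []).2 = false := by
        rw [hcomp, h]; simp [uGo]
      have hst : stOf (buf ++ ['\\', c]) = if stOf buf = 0 ∧ c = '-' then 1 else 2 := by
        by_cases hnil : buf = []
        · subst hnil
          by_cases hc : c = '-' <;> simp [stOf, hc]
        · have hne2 : buf ++ ['\\', c] ≠ ['\\', '-'] := by
            rcases buf with _ | ⟨x, _ | ⟨y, tl⟩⟩ <;> simp_all
          simp [stOf, hnil, hne2]
          intro hx
          split at hx <;> simp_all
      have := ih false (buf ++ ['\\', c]) parts h2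
      simpa [splitGo, altGo, h1, h2, hst] using this
    | false =>
      by_cases hc : c = '\\'
      · subst hc
        have := ih true buf parts h
        simpa [splitGo, altGo] using this
      · by_cases hp : c = '|'
        · subst hp
          have := ih false [] (parts ++ [String.ofList buf]) (by simp [uGo])
          simpa [splitGo, altGo, uGo, stOf, fld_mk buf h] using this
        · have hcomp := uGo_append buf [c] false []
          have h1 : (uGo (buf ++ [c]) false []).1 = (uGo buf false []).1 ++ [c] := by
            rw [hcomp, h]; simp [uGo, hc]
          have h2 : (uGo (buf ++ [c]) false []).2 = false := by
            rw [hcomp, h]; simp [uGo, hc]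
          have hbufne : buf ≠ ['\\'] := by
            intro hb; rw [hb] at h; simp [uGo] at h
          have hst : stOf (buf ++ [c]) = 2 := by
            have : buf ++ [c] ≠ ['\\', '-'] := by
              intro hcontra
              rcases buf with _ | ⟨x, _ | ⟨y, tl⟩⟩ <;> simp_all
            simp [stOf, this]
          have := ih false (buf ++ [c]) parts h2
          simpa [splitGo, altGo, hc, hp, h1, h2, hst] using this

-- ===== VERDICT (by name: the statement is the Claim_ definition above) =====
theorem decode_record_spec : Claim_equal_decode_record := by
  intro line _ _
  unfold Spec_decode_record decode_record decode_record_alt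
  have h := main_inv line.toList false [] [] (by simp [uGo])
  have h0 : (uGo [] false []).1 = [] := rfl
  have hst : stOf [] = 0 := rfl
  rw [h0, hst] at h
  simp only [List.map_nil] at h
  have hfld : (fun value => if value = "\\-" then none else some (_unescape_field value)) = fld := rfl
  cases hs : splitGo line.toList false [] [] with
  | none => rw [hs] at h; simp only [Option.map_none] at h; rw [← h]
  | some vs => rw [hs] at h; simp only [Option.map_some] at h; rw [← h, hfld]
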